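-- pv_equiv track=rewrite | github.com/PaulineTurk/test_brier_bis_asym | MNHN/brier/predictor.py | predictor_identity
-- ===== SOURCE A (Python) =====
-- def predictor_identity(list_residu):
--     """
--     Predictor that predict with a probabilty of 1 that the amino acid will not be substituted.
--     """
--     cond_proba = {}
--     for aa_1 in list_residu:
--         cond_proba[aa_1] = {}
--         for aa_2 in list_residu:
--             if aa_1 == aa_2:
--                 cond_proba[aa_1][aa_2] = 1
--             else:
--                 cond_proba[aa_1][aa_2] = 0
--
--     unit_brier = brier_unit(cond_proba, list_residu)
--
--     return unit_brier
--
-- def brier_unit(cond_proba, list_residu):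
--     unit_Brier = {}
--     for aa_1 in list_residu:
--         unit_Brier[aa_1] = {}
--         for aa_2 in list_residu:
--             unit = 0
--             for j in list_residu:
--                 unit += (cond_proba[aa_1][j] - int(aa_2 == j))**2
--             unit_Brier[aa_1][aa_2] = unit
--
--     return unit_Brier
-- ===== SOURCE B (Python) =====
-- def predictor_identity(list_residu):
--     """
--     Same result as A: entry [aa1][aa2] is 0 when aa1 == aa2, else
--     count(aa1) + count(aa2) in list_residu; computed in O(n^2) without the
--     inner O(n) scan (the identity predictor makes the Brier sum collapse).
--     """
--     counts = {}
--     for aa in list_residu: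
--         counts[aa] = counts.get(aa, 0) + 1
--     uniq = list(counts)
--     return {a1: {a2: (0 if a1 == a2 else counts[a1] + counts[a2])
--                  for a2 in uniq}
--             for a1 in uniq}
-- ===== Notes on version B (the rewrite author's own statement) =====
-- stated objective: faster
-- what changed: Replaces the cubic triple loop (re-summing the squared differences for every cell) by a closed form per cell: a residue counter built in one pass, then each entry is 0 on the diagonal and count(aa1)+count(aa2) off it.
import Mathlib
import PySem

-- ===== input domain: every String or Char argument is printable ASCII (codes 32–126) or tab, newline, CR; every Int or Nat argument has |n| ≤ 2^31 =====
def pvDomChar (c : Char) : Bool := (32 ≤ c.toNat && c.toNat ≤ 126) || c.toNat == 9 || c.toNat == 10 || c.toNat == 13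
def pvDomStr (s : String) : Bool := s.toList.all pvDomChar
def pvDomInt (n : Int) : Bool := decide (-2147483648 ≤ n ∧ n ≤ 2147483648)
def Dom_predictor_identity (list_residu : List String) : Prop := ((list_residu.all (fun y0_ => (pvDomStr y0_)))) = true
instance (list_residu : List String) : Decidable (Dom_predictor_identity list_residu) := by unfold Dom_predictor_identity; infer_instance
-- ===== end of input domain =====

-- B replaces A's cubic triple loop by a one-pass residue counter and a per-cell
-- closed form (0 on the diagonal, count(aa1)+count(aa2) off it): O(n^2) vs O(n^3).

-- ===== PORT A =====
-- getD is exact here: every aa_1/j subscripted is an element of list_residu, hence a key.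
def brier_unit (cond_proba : PySem.Dict String (PySem.Dict String Int))
    (list_residu : List String) : PySem.Dict String (PySem.Dict String Int) :=
  list_residu.foldl (fun uB aa1 =>
    uB.insert aa1 (list_residu.foldl (fun inner aa2 =>
      inner.insert aa2 (list_residu.foldl (fun unit j =>
        unit + ((cond_proba.getD aa1 PySem.Dict.empty).getD j 0
                 - (if aa2 == j then (1:Int) else 0))^2) 0)) PySem.Dict.empty))
    PySem.Dict.empty

def predictor_identity (list_residu : List String) : List (String × List (String × Int)) :=
  let cond_proba : PySem.Dict String (PySem.Dict String Int) :=
    list_residu.foldl (fun d aa1 =>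
      d.insert aa1 (list_residu.foldl (fun d2 aa2 =>
        d2.insert aa2 (if aa1 == aa2 then (1:Int) else 0)) PySem.Dict.empty))
      PySem.Dict.empty
  let unit_brier := brier_unit cond_proba list_residu
  unit_brier.items.map (fun p => (p.1, p.2.items))

-- ===== PORT B =====
def predictor_identity_alt (list_residu : List String) : List (String × List (String × Int)) :=
  let counts : PySem.Dict String Int :=
    list_residu.foldl (fun d aa => d.insert aa (d.getD aa 0 + 1)) PySem.Dict.empty
  let uniq := counts.keys
  uniq.map (fun a1 => (a1, uniq.map (fun a2 =>
    (a2, if a1 == a2 then (0:Int) else counts.getD a1 0 + counts.getD a2 0))))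

-- ===== PRECONDITION & SPEC =====
def Spec_predictor_identity (list_residu : List String) (out : List (String × List (String × Int))) : Prop := out = predictor_identity_alt list_residu
instance (list_residu : List String) (out : List (String × List (String × Int))) : Decidable (Spec_predictor_identity list_residu out) := by unfold Spec_predictor_identity; infer_instance

-- ===== CLAIM (what is proved, stated in full; the proofs are below) =====
def Claim_equal_predictor_identity : Prop := ∀ (list_residu : List String), Dom_predictor_identity list_residu → Spec_predictor_identity list_residu (predictor_identity list_residu)

-- ===== LEMMAS AND PROOFS =====

-- a loop 'for x in l: d[x] = f(x)' : lookup afterwards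
theorem getD_foldl_insert_fn {κ ν : Type} [BEq κ] [LawfulBEq κ] (f : κ → ν)
    (l : List κ) (d : PySem.Dict κ ν) (k : κ) (dflt : ν) :
    (l.foldl (fun d x => d.insert x (f x)) d).getD k dflt
      = if k ∈ l then f k else d.getD k dflt := by
  induction l generalizing d with
  | nil => simp
  | cons x xs ih =>
    simp only [List.foldl_cons, ih, List.mem_cons]
    by_cases hk : k ∈ xs
    · simp [hk]
    · by_cases hx : k = x
      · subst hx; simp [hk, PySem.Dict.getD_insert_self]
      · simp [hk, hx, PySem.Dict.getD_insert_of_ne d (f x) dflt hx]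

theorem items_foldl_insert_fn {κ ν : Type} [BEq κ] [LawfulBEq κ] (f : κ → ν) (l : List κ) (dflt : ν) :
    (l.foldl (fun d x => d.insert x (f x)) PySem.Dict.empty).items
      = (PySem.Set.ofList l).map (fun k => (k, f k)) := by
  have hk : (l.foldl (fun d x => d.insert x (f x)) (PySem.Dict.empty (κ := κ) (ν := ν))).keys
      = PySem.Set.ofList l := by
    rw [PySem.Dict.keys_foldl_insert]
    simp [PySem.Dict.keys_empty, PySem.Set.update_nil_left]
  have hnd : (l.foldl (fun d x => d.insert x (f x)) (PySem.Dict.empty (κ := κ) (ν := ν))).keys.Nodup := by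
    rw [hk]; exact PySem.Set.nodup_ofList l
  rw [PySem.Dict.items_eq_map_keys _ hnd dflt, hk]
  refine List.map_congr_left (fun k hkmem => ?_)
  rw [getD_foldl_insert_fn]
  simp [(PySem.Set.mem_ofList l k).mp hkmem]

-- the inner Brier sum collapses to a closed form
theorem sum_sq_diff (a1 a2 : String) (l : List String) (acc : Int) :
    l.foldl (fun unit j =>
        unit + ((if a1 = j then (1:Int) else 0) - (if a2 == j then (1:Int) else 0))^2) acc
      = acc + (if a1 = a2 then 0 else (l.count a1 : Int) + (l.count a2 : Int)) := by
  induction l generalizing acc with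
  | nil => simp
  | cons x xs ih =>
    simp only [List.foldl_cons, ih]
    by_cases h12 : a1 = a2
    · subst h12; simp
    · simp only [List.count_cons, h12, if_false, beq_iff_eq]
      by_cases h1 : a1 = x <;> by_cases h2 : a2 = x
      · exact absurd (h1.trans h2.symm) h12
      · have h2' : ¬ x = a2 := fun h => h2 h.symm
        simp only [h1, h2, h2', if_true, if_false, add_zero]; push_cast; ring
      · have h1' : ¬ x = a1 := fun h => h1 h.symm
        simp only [h1, h2, h1', if_true, if_false, add_zero]; push_cast; ring
      · have h1' : ¬ x = a1 := fun h => h1 h.symm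
        have h2' : ¬ x = a2 := fun h => h2 h.symm
        simp only [h1, h2, h1', h2', if_false, add_zero]; push_cast; ring

theorem predictor_identity_eq (l : List String) :
    predictor_identity l = predictor_identity_alt l := by
  simp only [predictor_identity, predictor_identity_alt, brier_unit]
  have hcnt : ∀ k : String,
      (l.foldl (fun d aa => d.insert aa (d.getD aa 0 + 1)) PySem.Dict.empty).getD k 0
        = (l.count k : Int) := by
    intro k; rw [PySem.Dict.getD_foldl_insert_add_one]; simp
  have hkeys : (l.foldl (fun d aa => d.insert aa (d.getD aa 0 + 1))
      (PySem.Dict.empty (κ := String) (ν := Int))).keys = PySem.Set.ofList l := by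
    rw [PySem.Dict.keys_foldl_insert]
    simp [PySem.Dict.keys_empty, PySem.Set.update_nil_left]
  simp only [hkeys]
  -- cond_proba lookup: for a1 ∈ l and j ∈ l it is the identity indicator
  have hcp : ∀ a1 ∈ l, ∀ j ∈ l,
      ((l.foldl (fun d aa1 =>
          d.insert aa1 (l.foldl (fun d2 aa2 =>
            d2.insert aa2 (if aa1 == aa2 then (1:Int) else 0)) PySem.Dict.empty))
          PySem.Dict.empty).getD a1 PySem.Dict.empty).getD j 0
        = if a1 = j then (1:Int) else 0 := by
    intro a1 h1 j hj
    rw [getD_foldl_insert_fn]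
    simp only [h1, if_true]
    rw [getD_foldl_insert_fn]
    simp [hj, beq_iff_eq]
  rw [items_foldl_insert_fn _ _ PySem.Dict.empty, List.map_map]
  refine List.map_congr_left (fun a1 h1 => ?_)
  have h1l : a1 ∈ l := (PySem.Set.mem_ofList l a1).mp h1
  refine Prod.ext rfl ?_
  simp only [Function.comp]
  rw [items_foldl_insert_fn _ _ (0 : Int)]
  refine List.map_congr_left (fun a2 h2 => ?_)
  refine Prod.ext rfl ?_
  simp only
  have hfold : (l.foldl (fun unit j =>
      unit + (((l.foldl (fun d aa1 =>
          d.insert aa1 (l.foldl (fun d2 aa2 =>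
            d2.insert aa2 (if aa1 == aa2 then (1:Int) else 0)) PySem.Dict.empty))
          PySem.Dict.empty).getD a1 PySem.Dict.empty).getD j 0
            - (if a2 == j then (1:Int) else 0))^2) 0)
      = l.foldl (fun unit j =>
          unit + ((if a1 = j then (1:Int) else 0) - (if a2 == j then (1:Int) else 0))^2) 0 := by
    refine PySem.List.foldl_congr_mem _ _ _ _ (fun acc j hj => ?_)
    rw [hcp a1 h1l j hj]
  rw [hfold, sum_sq_diff]
  simp [hcnt, beq_iff_eq]

-- ===== VERDICT (by name: the statement is the Claim_ definition above) =====
theorem predictor_identity_spec : Claim_equal_predictor_identity := by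
  intro l _
  exact predictor_identity_eq l
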